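-- pv_equiv track=rewrite | github.com/Imukua/alx-interview | 0x01-lockboxes/0-lockboxes.py | isUnlockableContainers
-- ===== SOURCE A (Python) =====
-- def isUnlockableContainers(containerList):
--     '''Checks if all the containers in a list of boxes containing the access
--     keys (indices) to other containers can be unlocked, assuming that the first
--     container is already unlocked.
--     '''
--     numContainers = len(containerList)
--     visitedContainers = set([0])
--     unvisitedContainers = set(containerList[0]).difference(set([0]))
--
--     while len(unvisitedContainers) > 0:
--         currentContainerIdx = unvisitedContainers.pop()
--
--         if not currentContainerIdx or currentContainerIdx >= numContainers or currentContainerIdx < 0: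
--             continue
--
--         if currentContainerIdx not in visitedContainers:
--             unvisitedContainers = unvisitedContainers.union(containerList[currentContainerIdx])
--             visitedContainers.add(currentContainerIdx)
--
--     return numContainers == len(visitedContainers)
-- ===== SOURCE B (Python) =====
-- def isUnlockableContainers(containerList):
--     '''Checks if all containers can be unlocked starting from container 0,
--     by fixpoint iteration: full passes over a snapshot of the unlocked set
--     until a pass adds nothing.'''
--     n = len(containerList)
--     unlocked = {0}
--     changed = True
--     while changed:
--         changed = False
--         for i in list(unlocked):
--             for key in containerList[i]:
--                 if 0 <= key < n and key not in unlocked: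
--                     unlocked.add(key)
--                     changed = True
--     return len(unlocked) == n
-- ===== Notes on version B (the rewrite author's own statement) =====
-- stated objective: alternative
-- what changed: Replaces A's worklist (pop one pending key at a time, rebuild the pending set by union with the popped key's row) by round-based fixpoint iteration: repeated full passes over a snapshot of the unlocked set with a changed flag, no pending/visited split.
-- outside the precondition, e.g. on isUnlockableContainers([]): A raises IndexError, B raises IndexError
import Mathlib
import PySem

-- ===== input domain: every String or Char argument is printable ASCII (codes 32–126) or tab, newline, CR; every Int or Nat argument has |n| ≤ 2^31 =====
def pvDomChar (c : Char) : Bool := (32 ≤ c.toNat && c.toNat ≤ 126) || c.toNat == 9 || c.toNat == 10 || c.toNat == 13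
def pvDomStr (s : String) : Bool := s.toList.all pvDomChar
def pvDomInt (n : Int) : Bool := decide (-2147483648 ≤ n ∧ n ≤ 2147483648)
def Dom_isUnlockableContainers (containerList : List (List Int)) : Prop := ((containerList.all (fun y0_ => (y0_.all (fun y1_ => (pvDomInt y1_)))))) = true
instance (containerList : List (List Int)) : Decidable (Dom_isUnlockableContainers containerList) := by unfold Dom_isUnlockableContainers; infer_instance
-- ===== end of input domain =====

-- B replaces A's worklist algorithm by round-based fixpoint iteration (full passes with a
-- changed flag); same exact result, no speed claim. Python set.pop / set iteration order is
-- unspecified: both ports fix the list order, which is sound because the returned Bool is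
-- order-independent (both compute the size of the reachable set, as the proof shows).


-- ===== PORT A =====

-- containerList[i]; the [] default is never used where its Python is read (A reads index 0
-- under Pre_, and otherwise only indices checked to be in range).
def pvRow (cl : List (List Int)) (i : Int) : List Int := (PySem.List.pyGet? cl i).getD []

-- termination measure: how many valid indices are not yet in V
def pvMissing (n : Nat) (V : List Int) : Nat :=
  ((List.range n).filter (fun j : Nat => !decide ((j : Int) ∈ V))).length

theorem pvMissing_lt (n : Nat) (V V' : List Int) (hsub : ∀ x ∈ V, x ∈ V') (j : Nat)
    (hj : j < n) (hjV : (j : Int) ∉ V) (hjV' : (j : Int) ∈ V') :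
    pvMissing n V' < pvMissing n V := by
  have hsb : List.Sublist ((List.range n).filter (fun j : Nat => !decide ((j : Int) ∈ V')))
      ((List.range n).filter (fun j : Nat => !decide ((j : Int) ∈ V))) := by
    apply List.monotone_filter_right
    intro a ha
    simp only [Bool.not_eq_true', decide_eq_false_iff_not] at *
    exact fun hmem => ha (hsub _ hmem)
  refine Nat.lt_of_le_of_ne hsb.length_le ?_
  intro heq
  have heql := hsb.eq_of_length heq
  have hmem : j ∈ (List.range n).filter (fun j : Nat => !decide ((j : Int) ∈ V)) := by
    simp [List.mem_filter, List.mem_range, hj, hjV]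
  rw [← heql] at hmem
  simp [List.mem_filter] at hmem
  exact hmem.2 hjV'

-- the while-loop of A; set.pop ported as taking the first element of the pending set
def pvLoopA : List (List Int) → PySem.Set Int → PySem.Set Int → PySem.Set Int
  | _, visited, [] => visited
  | cl, visited, idx :: rest =>
    if h1 : idx = 0 ∨ (cl.length : Int) ≤ idx ∨ idx < 0 then
      pvLoopA cl visited rest
    else if h2 : idx ∈ visited then
      pvLoopA cl visited rest
    else
      pvLoopA cl (PySem.Set.add visited idx) (PySem.Set.union rest (pvRow cl idx))
termination_by cl visited unvisited => (pvMissing cl.length visited, unvisited.length)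
decreasing_by
  · exact Prod.Lex.right _ (by simp)
  · exact Prod.Lex.right _ (by simp)
  · apply Prod.Lex.left
    push_neg at h1
    obtain ⟨hne0, hlt, hge⟩ := h1
    have hcast : ((idx.toNat : Int)) = idx := Int.toNat_of_nonneg hge
    apply pvMissing_lt cl.length visited (PySem.Set.add visited idx)
      (fun x hx => (PySem.Set.mem_add _ _ _).mpr (Or.inl hx)) idx.toNat
    · omega
    · rw [hcast]; exact h2
    · rw [hcast]; exact (PySem.Set.mem_add _ _ _).mpr (Or.inr rfl)

def isUnlockableContainers (containerList : List (List Int)) : Bool :=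
  let numContainers : Int := containerList.length
  let visited : PySem.Set Int := PySem.Set.ofList [(0 : Int)]
  let unvisited : PySem.Set Int :=
    PySem.Set.diff (PySem.Set.ofList (pvRow containerList 0)) (PySem.Set.ofList [(0 : Int)])
  decide (numContainers = PySem.Set.len (pvLoopA containerList visited unvisited))

-- ===== PORT B =====

-- body of B's innermost loop: if 0 <= key < n and key not in unlocked: add, changed = True
def pvPassInner (n : Int) (st : PySem.Set Int × Bool) (k : Int) : PySem.Set Int × Bool :=
  if 0 ≤ k ∧ k < n ∧ k ∉ st.1 then (PySem.Set.add st.1 k, true) else st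

-- for i in snapshot: for key in containerList[i]: …
def pvPass (cl : List (List Int)) (st : PySem.Set Int × Bool) (i : Int) : PySem.Set Int × Bool :=
  (pvRow cl i).foldl (pvPassInner (cl.length : Int)) st

theorem pvInnerFold_grow (n : Int) (ks : List Int) (st : PySem.Set Int × Bool) :
    (∀ x ∈ st.1, x ∈ (ks.foldl (pvPassInner n) st).1) ∧
    ((ks.foldl (pvPassInner n) st).2 = true → st.2 = true ∨
      ∃ k, 0 ≤ k ∧ k < n ∧ k ∉ st.1 ∧ k ∈ (ks.foldl (pvPassInner n) st).1) := by
  induction ks generalizing st with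
  | nil => exact ⟨fun x hx => hx, fun h => Or.inl h⟩
  | cons k ks ih =>
    simp only [List.foldl_cons]
    by_cases hc : 0 ≤ k ∧ k < n ∧ k ∉ st.1
    · have hst : pvPassInner n st k = (PySem.Set.add st.1 k, true) := by
        simp [pvPassInner, hc]
      rw [hst]
      obtain ⟨ih1, _⟩ := ih (PySem.Set.add st.1 k, true)
      refine ⟨fun x hx => ih1 x ((PySem.Set.mem_add _ _ _).mpr (Or.inl hx)), fun _ => Or.inr ?_⟩
      exact ⟨k, hc.1, hc.2.1, hc.2.2, ih1 k ((PySem.Set.mem_add _ _ _).mpr (Or.inr rfl))⟩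
    · have hst : pvPassInner n st k = st := by simp only [pvPassInner, if_neg hc]
      rw [hst]; exact ih st

theorem pvPassFold_grow (cl : List (List Int)) (is : List Int) (st : PySem.Set Int × Bool) :
    (∀ x ∈ st.1, x ∈ (is.foldl (pvPass cl) st).1) ∧
    ((is.foldl (pvPass cl) st).2 = true → st.2 = true ∨
      ∃ k, 0 ≤ k ∧ k < (cl.length : Int) ∧ k ∉ st.1 ∧ k ∈ (is.foldl (pvPass cl) st).1) := by
  induction is generalizing st with
  | nil => exact ⟨fun x hx => hx, fun h => Or.inl h⟩
  | cons i is ih =>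
    simp only [List.foldl_cons]
    obtain ⟨g1, g2⟩ := pvInnerFold_grow (cl.length : Int) (pvRow cl i) st
    obtain ⟨ih1, ih2⟩ := ih (pvPass cl st i)
    refine ⟨fun x hx => ih1 x (g1 x hx), fun h => ?_⟩
    rcases ih2 h with h' | ⟨k, h0, hn, hk, hkm⟩
    · rcases g2 h' with h'' | ⟨k, h0, hn, hk, hkm⟩
      · exact Or.inl h''
      · exact Or.inr ⟨k, h0, hn, hk, ih1 k hkm⟩
    · by_cases hks : k ∈ st.1
      · exact absurd (g1 k hks) hk
      · exact Or.inr ⟨k, h0, hn, hks, hkm⟩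

-- one full pass over a snapshot of unlocked (changed starts False)
def pvDoPass (cl : List (List Int)) (unlocked : PySem.Set Int) : PySem.Set Int × Bool :=
  unlocked.foldl (pvPass cl) (unlocked, false)

theorem pvPass_missing_lt (cl : List (List Int)) (unlocked : PySem.Set Int)
    (h : (pvDoPass cl unlocked).2 = true) :
    pvMissing cl.length (pvDoPass cl unlocked).1 <
      pvMissing cl.length unlocked := by
  unfold pvDoPass at h ⊢
  obtain ⟨g1, g2⟩ := pvPassFold_grow cl unlocked (unlocked, false)
  rcases g2 h with h' | ⟨k, h0, hn, hk, hkm⟩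
  · simp at h'
  · have hcast : ((k.toNat : Int)) = k := Int.toNat_of_nonneg h0
    apply pvMissing_lt cl.length unlocked _ g1 k.toNat
    · omega
    · rw [hcast]; exact hk
    · rw [hcast]; exact hkm

-- the while-changed loop of B (entered once unconditionally, as changed starts True)
def pvLoopB (cl : List (List Int)) (unlocked : PySem.Set Int) : PySem.Set Int :=
  if h : (pvDoPass cl unlocked).2 then
    pvLoopB cl (pvDoPass cl unlocked).1
  else
    (pvDoPass cl unlocked).1
termination_by pvMissing cl.length unlocked
decreasing_by
  exact pvPass_missing_lt cl unlocked h

def isUnlockableContainers_alt (containerList : List (List Int)) : Bool :=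
  let n : Int := containerList.length
  decide (PySem.Set.len (pvLoopB containerList (PySem.Set.ofList [(0 : Int)])) = n)

-- ===== PRECONDITION & SPEC =====

-- Pre_ excludes only the empty list, on which Python A raises IndexError (containerList[0]).
def Pre_isUnlockableContainers (containerList : List (List Int)) : Prop := containerList ≠ []
instance (containerList : List (List Int)) : Decidable (Pre_isUnlockableContainers containerList) := by
  unfold Pre_isUnlockableContainers; infer_instance

def pvWitness_isUnlockableContainers : List (List Int) := [[1, 2], [2], [0]]

def Spec_isUnlockableContainers (containerList : List (List Int)) (out : Bool) : Prop :=
  out = isUnlockableContainers_alt containerList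
instance (containerList : List (List Int)) (out : Bool) :
    Decidable (Spec_isUnlockableContainers containerList out) := by
  unfold Spec_isUnlockableContainers; infer_instance

-- ===== CLAIM (what is proved, stated in full; the proofs are below) =====
def Claim_equal_isUnlockableContainers : Prop :=
  ∀ (containerList : List (List Int)), Dom_isUnlockableContainers containerList →
    Pre_isUnlockableContainers containerList →
    Spec_isUnlockableContainers containerList (isUnlockableContainers containerList)

-- ===== LEMMAS AND PROOFS =====

-- reachability from container 0 through valid keys: what both programs compute
inductive pvReach (cl : List (List Int)) : Int → Prop
  | zero : pvReach cl 0
  | step (i k : Int) : pvReach cl i → 0 ≤ i → i < (cl.length : Int) →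
      k ∈ pvRow cl i → 0 ≤ k → k < (cl.length : Int) → pvReach cl k

def pvR (cl : List (List Int)) (x : Int) : Prop :=
  pvReach cl x ∧ 0 ≤ x ∧ x < (cl.length : Int)

theorem pvReach_mem_of_closed (cl : List (List Int)) (V : List Int) (h0 : (0 : Int) ∈ V)
    (hcl : ∀ i ∈ V, ∀ k ∈ pvRow cl i, 0 ≤ k → k < (cl.length : Int) → k ∈ V) :
    ∀ x, pvReach cl x → x ∈ V := by
  intro x hx
  induction hx with
  | zero => exact h0
  | step i k _ _ _ hk hk0 hkn ih => exact hcl i ih k hk hk0 hkn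

theorem pvLoopA_mem (cl : List (List Int)) :
    ∀ (visited unvisited : PySem.Set Int),
    (∀ x ∈ visited, pvR cl x) → (0 : Int) ∈ visited →
    (∀ x ∈ unvisited, 0 ≤ x → x < (cl.length : Int) → pvReach cl x) →
    (∀ i ∈ visited, ∀ k ∈ pvRow cl i, 0 ≤ k → k < (cl.length : Int) →
      k ∈ visited ∨ k ∈ unvisited) →
    visited.Nodup →
    (∀ x, x ∈ pvLoopA cl visited unvisited ↔ pvR cl x) ∧ (pvLoopA cl visited unvisited).Nodup := by
  intro visited unvisited
  fun_induction pvLoopA cl visited unvisited with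
  | case1 cl visited =>
    intro hvR h0 _ hcl hnd
    refine ⟨fun x => ⟨fun hx => hvR x hx, fun hx => ?_⟩, hnd⟩
    exact pvReach_mem_of_closed cl visited h0
      (fun i hi k hk hk0 hkn => by
        rcases hcl i hi k hk hk0 hkn with h | h
        · exact h
        · exact absurd h List.not_mem_nil) x hx.1
  | case2 cl visited idx rest h1 ih =>
    intro hvR h0 huR hcl hnd
    apply ih hvR h0 (fun x hx => huR x (List.mem_cons_of_mem _ hx))
    · intro i hi k hk hk0 hkn
      rcases hcl i hi k hk hk0 hkn with h | h
      · exact Or.inl h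
      · rcases List.mem_cons.mp h with rfl | h'
        · rcases h1 with rfl | h1 | h1
          · exact Or.inl h0
          · omega
          · omega
        · exact Or.inr h'
    · exact hnd
  | case3 cl visited idx rest h1 h2 ih =>
    intro hvR h0 huR hcl hnd
    apply ih hvR h0 (fun x hx => huR x (List.mem_cons_of_mem _ hx))
    · intro i hi k hk hk0 hkn
      rcases hcl i hi k hk hk0 hkn with h | h
      · exact Or.inl h
      · rcases List.mem_cons.mp h with rfl | h'
        · exact Or.inl h2
        · exact Or.inr h'
    · exact hnd
  | case4 cl visited idx rest h1 h2 ih =>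
    intro hvR h0 huR hcl hnd
    have h1' := h1
    push_neg at h1'
    obtain ⟨hne0, hlt, hge⟩ := h1'
    have hReach : pvReach cl idx := huR idx List.mem_cons_self hge hlt
    apply ih
    · intro x hx
      rcases (PySem.Set.mem_add _ _ _).mp hx with h | rfl
      · exact hvR x h
      · exact ⟨hReach, hge, hlt⟩
    · exact (PySem.Set.mem_add _ _ _).mpr (Or.inl h0)
    · intro x hx hx0 hxn
      rcases (PySem.Set.mem_union _ _ _).mp hx with h | h
      · exact huR x (List.mem_cons_of_mem _ h) hx0 hxn
      · exact pvReach.step idx x hReach hge hlt h hx0 hxn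
    · intro i hi k hk hk0 hkn
      rcases (PySem.Set.mem_add _ _ _).mp hi with h | rfl
      · rcases hcl i h k hk hk0 hkn with h' | h'
        · exact Or.inl ((PySem.Set.mem_add _ _ _).mpr (Or.inl h'))
        · rcases List.mem_cons.mp h' with rfl | h''
          · exact Or.inl ((PySem.Set.mem_add _ _ _).mpr (Or.inr rfl))
          · exact Or.inr ((PySem.Set.mem_union _ _ _).mpr (Or.inl h''))
      · exact Or.inr ((PySem.Set.mem_union _ _ _).mpr (Or.inr hk))
    · exact PySem.Set.nodup_add _ _ hnd

-- flag monotonicity of B's pass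
theorem pvInnerFold_flag (n : Int) (ks : List Int) (st : PySem.Set Int × Bool)
    (h : st.2 = true) : (ks.foldl (pvPassInner n) st).2 = true := by
  induction ks generalizing st with
  | nil => exact h
  | cons k ks ih =>
    simp only [List.foldl_cons]
    apply ih
    by_cases hc : 0 ≤ k ∧ k < n ∧ k ∉ st.1
    · simp [pvPassInner, hc]
    · simp only [pvPassInner, if_neg hc]; exact h

theorem pvInnerFold_false (n : Int) (ks : List Int) (st : PySem.Set Int × Bool)
    (h : (ks.foldl (pvPassInner n) st).2 = false) :
    (ks.foldl (pvPassInner n) st).1 = st.1 ∧ st.2 = false ∧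
      ∀ k ∈ ks, 0 ≤ k → k < n → k ∈ st.1 := by
  induction ks generalizing st with
  | nil => exact ⟨rfl, h, by simp⟩
  | cons k ks ih =>
    simp only [List.foldl_cons] at h ⊢
    by_cases hc : 0 ≤ k ∧ k < n ∧ k ∉ st.1
    · exfalso
      have h2 : (pvPassInner n st k).2 = true := by simp [pvPassInner, hc]
      have h3 := pvInnerFold_flag n ks _ h2
      rw [h] at h3; exact Bool.false_ne_true h3
    · have hst : pvPassInner n st k = st := by simp only [pvPassInner, if_neg hc]
      rw [hst] at h ⊢
      obtain ⟨e1, e2, e3⟩ := ih st h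
      refine ⟨e1, e2, fun k' hk' hk0 hkn => ?_⟩
      rcases List.mem_cons.mp hk' with rfl | h'
      · by_contra hmem
        exact hc ⟨hk0, hkn, hmem⟩
      · exact e3 k' h' hk0 hkn

theorem pvPassFold_false (cl : List (List Int)) (is : List Int) (st : PySem.Set Int × Bool)
    (h : (is.foldl (pvPass cl) st).2 = false) :
    (is.foldl (pvPass cl) st).1 = st.1 ∧ st.2 = false ∧
      ∀ i ∈ is, ∀ k ∈ pvRow cl i, 0 ≤ k → k < (cl.length : Int) → k ∈ st.1 := by
  induction is generalizing st with
  | nil => exact ⟨rfl, h, by simp⟩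
  | cons i is ih =>
    simp only [List.foldl_cons] at h ⊢
    obtain ⟨e1, e2, e3⟩ := ih _ h
    obtain ⟨f1, f2, f3⟩ := pvInnerFold_false (cl.length : Int) (pvRow cl i) st e2
    have f1' : (pvPass cl st i).1 = st.1 := f1
    rw [f1'] at e1
    refine ⟨e1, f2, fun i' hi' k hk hk0 hkn => ?_⟩
    rcases List.mem_cons.mp hi' with rfl | h'
    · exact f3 k hk hk0 hkn
    · rw [← f1']; exact e3 i' h' k hk hk0 hkn

-- soundness and nodup preservation of B's pass
theorem pvInnerFold_pres (cl : List (List Int)) (ks : List Int) (st : PySem.Set Int × Bool)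
    (hks : ∀ k ∈ ks, 0 ≤ k → k < (cl.length : Int) → pvReach cl k)
    (hs : ∀ x ∈ st.1, pvR cl x) (hnd : st.1.Nodup) :
    (∀ x ∈ (ks.foldl (pvPassInner (cl.length : Int)) st).1, pvR cl x) ∧
      (ks.foldl (pvPassInner (cl.length : Int)) st).1.Nodup := by
  induction ks generalizing st with
  | nil => exact ⟨hs, hnd⟩
  | cons k ks ih =>
    simp only [List.foldl_cons]
    by_cases hc : 0 ≤ k ∧ k < (cl.length : Int) ∧ k ∉ st.1
    · have hst : pvPassInner (cl.length : Int) st k = (PySem.Set.add st.1 k, true) := by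
        simp [pvPassInner, hc]
      rw [hst]
      apply ih _ (fun k' hk' => hks k' (List.mem_cons_of_mem _ hk'))
      · intro x hx
        rcases (PySem.Set.mem_add _ _ _).mp hx with h | rfl
        · exact hs x h
        · exact ⟨hks x List.mem_cons_self hc.1 hc.2.1, hc.1, hc.2.1⟩
      · exact PySem.Set.nodup_add _ _ hnd
    · have hst : pvPassInner (cl.length : Int) st k = st := by
        simp only [pvPassInner, if_neg hc]
      rw [hst]
      exact ih st (fun k' hk' => hks k' (List.mem_cons_of_mem _ hk')) hs hnd

theorem pvPassFold_pres (cl : List (List Int)) (is : List Int) (st : PySem.Set Int × Bool)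
    (his : ∀ i ∈ is, pvR cl i)
    (hs : ∀ x ∈ st.1, pvR cl x) (hnd : st.1.Nodup) :
    (∀ x ∈ (is.foldl (pvPass cl) st).1, pvR cl x) ∧ (is.foldl (pvPass cl) st).1.Nodup := by
  induction is generalizing st with
  | nil => exact ⟨hs, hnd⟩
  | cons i is ih =>
    simp only [List.foldl_cons]
    obtain ⟨hiR, hi0, hin⟩ := his i List.mem_cons_self
    obtain ⟨p1, p2⟩ := pvInnerFold_pres cl (pvRow cl i) st
      (fun k hk hk0 hkn => pvReach.step i k hiR hi0 hin hk hk0 hkn) hs hnd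
    exact ih _ (fun i' hi' => his i' (List.mem_cons_of_mem _ hi')) p1 p2

theorem pvLoopB_mem (cl : List (List Int)) :
    ∀ (unlocked : PySem.Set Int),
    (∀ x ∈ unlocked, pvR cl x) → (0 : Int) ∈ unlocked → unlocked.Nodup →
    (∀ x, x ∈ pvLoopB cl unlocked ↔ pvR cl x) ∧ (pvLoopB cl unlocked).Nodup := by
  intro unlocked
  fun_induction pvLoopB cl unlocked with
  | case1 unlocked hchg ih =>
    intro hs h0 hnd
    obtain ⟨g1, _⟩ := pvPassFold_grow cl unlocked (unlocked, false)
    obtain ⟨p1, p2⟩ := pvPassFold_pres cl unlocked (unlocked, false) hs hs hnd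
    simp only [pvDoPass] at *
    exact ih p1 (g1 0 h0) p2
  | case2 unlocked hchg =>
    intro hs h0 hnd
    have hfalse : (unlocked.foldl (pvPass cl) (unlocked, false)).2 = false := by
      simpa [pvDoPass] using hchg
    obtain ⟨e1, _, e3⟩ := pvPassFold_false cl unlocked (unlocked, false) hfalse
    simp only [pvDoPass]
    rw [e1]
    refine ⟨fun x => ⟨fun hx => hs x hx, fun hx => ?_⟩, hnd⟩
    exact pvReach_mem_of_closed cl unlocked h0 e3 x hx.1

-- ===== VERDICT (by name: the statement is the Claim_ definition above) =====
theorem isUnlockableContainers_spec : Claim_equal_isUnlockableContainers := by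
  intro cl _ hpre
  unfold Spec_isUnlockableContainers isUnlockableContainers isUnlockableContainers_alt
  have hnpos : 0 < cl.length := List.length_pos_iff.mpr hpre
  have hR0 : pvR cl 0 := ⟨pvReach.zero, le_refl 0, by exact_mod_cast hnpos⟩
  obtain ⟨hA, hAnd⟩ := pvLoopA_mem cl (PySem.Set.ofList [(0 : Int)])
    (PySem.Set.diff (PySem.Set.ofList (pvRow cl 0)) (PySem.Set.ofList [(0 : Int)]))
    (by intro x hx; simp [PySem.Set.mem_ofList] at hx; subst hx; exact hR0)
    (by simp [PySem.Set.mem_ofList])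
    (by
      intro x hx hx0 hxn
      obtain ⟨hx1, _⟩ := (PySem.Set.mem_diff _ _ _).mp hx
      have hxr : x ∈ pvRow cl 0 := (PySem.Set.mem_ofList _ _).mp hx1
      exact pvReach.step 0 x pvReach.zero (le_refl 0) (by exact_mod_cast hnpos) hxr hx0 hxn)
    (by
      intro i hi k hk hk0 hkn
      simp [PySem.Set.mem_ofList] at hi; subst hi
      by_cases hk0' : k = (0 : Int)
      · subst hk0'; exact Or.inl (by simp [PySem.Set.mem_ofList])
      · refine Or.inr ((PySem.Set.mem_diff _ _ _).mpr ⟨(PySem.Set.mem_ofList _ _).mpr hk, ?_⟩)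
        simp [PySem.Set.mem_ofList, hk0'])
    (by simp)
  obtain ⟨hB, hBnd⟩ := pvLoopB_mem cl (PySem.Set.ofList [(0 : Int)])
    (by intro x hx; simp [PySem.Set.mem_ofList] at hx; subst hx; exact hR0)
    (by simp [PySem.Set.mem_ofList])
    (by simp)
  have hperm : (pvLoopA cl (PySem.Set.ofList [(0 : Int)])
      (PySem.Set.diff (PySem.Set.ofList (pvRow cl 0)) (PySem.Set.ofList [(0 : Int)]))).Perm
      (pvLoopB cl (PySem.Set.ofList [(0 : Int)])) := by
    rw [List.perm_ext_iff_of_nodup hAnd hBnd]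
    intro a; rw [hA a, hB a]
  have hlen := hperm.length_eq
  simp only [PySem.Set.len, hlen]
  exact (decide_eq_decide.mpr (by omega))
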